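-- pv_equiv track=rewrite | github.com/sudd-bot/alert311 | backend/app/routes/reports.py | _normalize_addr
-- ===== SOURCE A (Python) =====
-- def _normalize_addr(a: str) -> str:
--     """
--     Normalize street-type abbreviations for address fuzzy matching.
--     Covers 13 common street types, applied symmetrically to both query and ticket address.
--     Defined at module level so it's compiled once at import time (not per-request).
--     """
--     a = a.lower().strip()
--     # Remove punctuation
--     a = a.replace(".", "").replace(",", "")
--     # Full → abbreviated (longer strings first to avoid partial matches)
--     replacements = [
--         (" boulevard", " blvd"),
--         (" terrace", " ter"),
--         (" avenue", " ave"),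
--         (" street", " st"),
--         (" drive", " dr"),
--         (" court", " ct"),
--         (" place", " pl"),
--         (" lane", " ln"),
--         (" road", " rd"),
--         (" circle", " cir"),
--         (" highway", " hwy"),
--         (" parkway", " pkwy"),
--         (" square", " sq"),
--     ]
--     for full, abbr in replacements:
--         a = a.replace(full, abbr)
--     return a
-- ===== SOURCE B (Python) =====
-- def _normalize_addr(a: str) -> str:
--     """Single left-to-right scan with a dispatch table instead of 13 sequential replace passes."""
--     s = a.lower().strip()
--     s = "".join(ch for ch in s if ch not in ".,")
--     table = {
--         "boulevard": "blvd", "terrace": "ter", "avenue": "ave", "street": "st",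
--         "drive": "dr", "court": "ct", "place": "pl", "lane": "ln", "road": "rd",
--         "circle": "cir", "highway": "hwy", "parkway": "pkwy", "square": "sq",
--     }
--     out = []
--     i, n = 0, len(s)
--     while i < n:
--         ch = s[i]
--         if ch == " ":
--             for full, abbr in table.items():
--                 if s.startswith(full, i + 1):
--                     out.append(" " + abbr)
--                     i += 1 + len(full)
--                     break
--             else:
--                 out.append(" ")
--                 i += 1
--         else:
--             out.append(ch)
--             i += 1
--     return "".join(out)
-- ===== Notes on version B (the rewrite author's own statement) =====
-- stated objective: alternative
-- what changed: A runs thirteen sequential full-string replace passes (one per street type); B makes a single left-to-right scan that, at each space, looks the following word up in a full-form-to-abbreviation dispatch table and skips past the match, so the string is traversed once.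
import Mathlib
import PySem

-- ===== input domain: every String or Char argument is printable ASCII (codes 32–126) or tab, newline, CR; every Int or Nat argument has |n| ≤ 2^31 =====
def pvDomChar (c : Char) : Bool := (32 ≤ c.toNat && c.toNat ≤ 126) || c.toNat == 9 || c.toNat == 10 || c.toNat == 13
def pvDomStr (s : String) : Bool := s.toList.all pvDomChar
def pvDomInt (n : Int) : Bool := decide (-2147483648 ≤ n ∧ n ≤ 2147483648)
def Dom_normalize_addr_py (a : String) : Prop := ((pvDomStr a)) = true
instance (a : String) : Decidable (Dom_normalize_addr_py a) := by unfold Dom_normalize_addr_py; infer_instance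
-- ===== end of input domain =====

-- B replaces A's thirteen sequential full-string `.replace` passes by one left-to-right scan
-- that dispatches on the word after each space via a lookup table (objective: alternative).

-- ===== PORT A =====
def repl_table : List (String × String) :=
  [(" boulevard", " blvd"), (" terrace", " ter"), (" avenue", " ave"), (" street", " st"),
   (" drive", " dr"), (" court", " ct"), (" place", " pl"), (" lane", " ln"),
   (" road", " rd"), (" circle", " cir"), (" highway", " hwy"), (" parkway", " pkwy"),
   (" square", " sq")]

def normalize_addr_py (a : String) : String :=
  let a1 := PySem.Str.replace (PySem.Str.replace (PySem.Str.strip (PySem.Str.lower a)) "." "") "," ""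
  repl_table.foldl (fun s pr => PySem.Str.replace s pr.1 pr.2) a1

-- ===== PORT B =====
def street_table : List (List Char × List Char) :=
  [("boulevard".toList, "blvd".toList), ("terrace".toList, "ter".toList),
   ("avenue".toList, "ave".toList), ("street".toList, "st".toList),
   ("drive".toList, "dr".toList), ("court".toList, "ct".toList),
   ("place".toList, "pl".toList), ("lane".toList, "ln".toList),
   ("road".toList, "rd".toList), ("circle".toList, "cir".toList),
   ("highway".toList, "hwy".toList), ("parkway".toList, "pkwy".toList),
   ("square".toList, "sq".toList)]

def try_match (rest : List Char) : Option (List Char × List Char) :=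
  match street_table.find? (fun pr => pr.1.isPrefixOf rest) with
  | some (full, abbr) => some (abbr, rest.drop full.length)
  | none => none

theorem try_match_length_le {rest ab rest' : List Char} (h : try_match rest = some (ab, rest')) :
    rest'.length ≤ rest.length := by
  unfold try_match at h
  rcases hf : street_table.find? (fun pr => pr.1.isPrefixOf rest) with _ | ⟨full, abbr⟩
  · rw [hf] at h; exact absurd h (by simp)
  · rw [hf] at h
    simp at h
    rw [← h.2]
    simp [List.length_drop]

def scan_abbr : List Char → List Char
  | [] => []
  | c :: rest =>
    if c = ' ' then
      match h : try_match rest with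
      | some (abbr, rest') => ' ' :: (abbr ++ scan_abbr rest')
      | none => ' ' :: scan_abbr rest
    else c :: scan_abbr rest
termination_by l => l.length
decreasing_by
  · exact Nat.lt_succ_of_le (try_match_length_le h)
  · simp
  · simp

def normalize_addr_py_alt (a : String) : String :=
  let s := (PySem.Str.strip (PySem.Str.lower a)).toList
  let s2 := s.filter (fun c => !(c == '.' || c == ','))
  String.ofList (scan_abbr s2)

-- ===== PRECONDITION & SPEC =====
def Spec_normalize_addr_py (a : String) (out : String) : Prop := out = normalize_addr_py_alt a
instance (a : String) (out : String) : Decidable (Spec_normalize_addr_py a out) := by unfold Spec_normalize_addr_py; infer_instance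

-- ===== CLAIM (what is proved, stated in full; the proofs are below) =====
def Claim_equal_normalize_addr_py : Prop := ∀ (a : String), Dom_normalize_addr_py a → Spec_normalize_addr_py a (normalize_addr_py a)

-- ===== LEMMAS AND PROOFS =====

theorem go_acc (old nw : List Char) : ∀ (fuel : Nat) (l acc : List Char),
    PySem.Chars.replace.go old nw fuel l acc = acc.reverse ++ PySem.Chars.replace.go old nw fuel l [] := by
  intro fuel
  induction fuel with
  | zero => intro l acc; simp [PySem.Chars.replace.go]
  | succ f ih =>
    intro l acc
    cases l with
    | nil => simp [PySem.Chars.replace.go]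
    | cons c t =>
      simp only [PySem.Chars.replace.go]
      split
      · rw [ih _ (nw.reverse ++ acc), ih _ (nw.reverse ++ [])]; simp
      · rw [ih t (c :: acc), ih t [c]]; simp

theorem go_fuel (old nw : List Char) (hold : old ≠ []) : ∀ (f1 f2 : Nat) (l : List Char),
    l.length ≤ f1 → l.length ≤ f2 →
    PySem.Chars.replace.go old nw f1 l [] = PySem.Chars.replace.go old nw f2 l [] := by
  intro f1
  induction f1 with
  | zero =>
    intro f2 l h1 h2
    have : l = [] := List.eq_nil_of_length_eq_zero (Nat.le_zero.mp h1)
    subst this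
    cases f2 <;> simp [PySem.Chars.replace.go]
  | succ f ih =>
    intro f2 l h1 h2
    cases l with
    | nil => cases f2 <;> simp [PySem.Chars.replace.go]
    | cons c t =>
      cases f2 with
      | zero => simp at h2
      | succ f2' =>
        simp only [PySem.Chars.replace.go]
        split
        · rw [go_acc, go_acc old nw f2']
          have hlen : (List.drop old.length (c :: t)).length ≤ t.length := by
            have h1 : 1 ≤ old.length := List.length_pos_iff.mpr hold
            simp [List.length_drop]; omega
          rw [ih f2' _ (le_trans hlen (Nat.le_of_succ_le_succ h1)) (le_trans hlen (Nat.le_of_succ_le_succ h2))]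
        · rw [go_acc, go_acc old nw f2']
          rw [ih f2' t (Nat.le_of_succ_le_succ h1) (Nat.le_of_succ_le_succ h2)]

theorem replace_nil (old nw : List Char) (hold : old ≠ []) : PySem.Chars.replace [] old nw = [] := by
  simp [PySem.Chars.replace, hold, PySem.Chars.replace.go]

theorem replace_cons_nomatch (old nw : List Char) (hold : old ≠ []) (c : Char) (t : List Char)
    (h : ¬ old <+: (c :: t)) :
    PySem.Chars.replace (c :: t) old nw = c :: PySem.Chars.replace t old nw := by
  have hb : old.isPrefixOf (c :: t) = false := by
    rw [Bool.eq_false_iff]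
    intro hc
    exact h (List.isPrefixOf_iff_prefix.mp hc)
  have hne : old.isEmpty = false := by simp [List.isEmpty_eq_false_iff, hold]
  simp only [PySem.Chars.replace, hne, Bool.false_eq_true, if_false]
  simp only [List.length_cons, PySem.Chars.replace.go, hb, Bool.false_eq_true, if_false]
  rw [go_acc]
  simp [go_fuel old nw hold t.length (t.length + 1) t (le_refl _) (by omega)]

theorem replace_match (old nw : List Char) (hold : old ≠ []) (l : List Char)
    (h : old <+: l) :
    PySem.Chars.replace l old nw = nw ++ PySem.Chars.replace (l.drop old.length) old nw := by
  have hb : old.isPrefixOf l = true := List.isPrefixOf_iff_prefix.mpr h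
  have hne : old.isEmpty = false := by simp [List.isEmpty_eq_false_iff, hold]
  obtain ⟨c, t, rfl⟩ : ∃ c t, l = c :: t := by
    cases l with
    | nil => exact absurd (List.prefix_nil.mp h) hold
    | cons c t => exact ⟨c, t, rfl⟩
  simp only [PySem.Chars.replace, hne, Bool.false_eq_true, if_false]
  simp only [List.length_cons, PySem.Chars.replace.go, hb, if_true]
  rw [go_acc]
  have hd : (List.drop old.length (c :: t)).length ≤ t.length := by
    have h1 : 1 ≤ old.length := List.length_pos_iff.mpr hold
    simp [List.length_drop]; omega
  rw [go_fuel old nw hold t.length (List.drop old.length (c :: t)).length _ hd (le_refl _)]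
  simp

theorem rep_chunk (chunk tail w r : List Char) (hc : ' ' ∉ chunk) :
    PySem.Chars.replace (chunk ++ tail) (' ' :: w) (' ' :: r)
      = chunk ++ PySem.Chars.replace tail (' ' :: w) (' ' :: r) := by
  induction chunk with
  | nil => simp
  | cons c ch ih =>
    have hc1 : c ≠ ' ' := by rintro rfl; exact hc (List.mem_cons_self)
    have hnm : ¬ (' ' :: w) <+: (c :: (ch ++ tail)) := by
      intro h
      exact hc1 ((List.cons_prefix_cons.mp h).1.symm)
    rw [List.cons_append, replace_cons_nomatch _ _ (by simp) _ _ hnm,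
        ih (fun h => hc (List.mem_cons_of_mem _ h))]
    simp

theorem nomatch_pres (w w' r' : List Char) (hw : w ≠ []) (hsp : ' ' ∉ w) :
    ∀ x : List Char, ¬ w <+: x → ¬ w <+: PySem.Chars.replace x (' ' :: w') (' ' :: r') := by
  intro x
  induction x generalizing w with
  | nil => intro h; rw [replace_nil _ _ (by simp)]; simpa using h
  | cons c t ih =>
    intro h hcontra
    by_cases hm : (' ' :: w') <+: (c :: t)
    · rw [replace_match _ _ (by simp) _ hm] at hcontra
      obtain ⟨wh, wt, rfl⟩ : ∃ wh wt, w = wh :: wt := by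
        cases w with
        | nil => exact absurd rfl hw
        | cons a b => exact ⟨a, b, rfl⟩
      have : wh = ' ' := (List.cons_prefix_cons.mp hcontra).1
      exact hsp (this ▸ List.mem_cons_self)
    · rw [replace_cons_nomatch _ _ (by simp) _ _ hm] at hcontra
      obtain ⟨wh, wt, rfl⟩ : ∃ wh wt, w = wh :: wt := by
        cases w with
        | nil => exact absurd rfl hw
        | cons a b => exact ⟨a, b, rfl⟩
      obtain ⟨rfl, hpre⟩ := List.cons_prefix_cons.mp hcontra
      cases wt with
      | nil => exact h (by simp)
      | cons a b =>
        refine ih (a :: b) (by simp) (fun hmem => hsp (List.mem_cons_of_mem _ hmem)) ?_ hpre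
        intro hpt
        exact h (List.cons_prefix_cons.mpr ⟨rfl, hpt⟩)

theorem not_prefix_append (u v z : List Char) (h1 : ¬ u <+: v) (h2 : ¬ v <+: u) : ¬ u <+: v ++ z := by
  intro h
  rcases Nat.le_total u.length v.length with hle | hle
  · exact h1 (List.prefix_of_prefix_length_le h (List.prefix_append v z) hle)
  · exact h2 (List.prefix_of_prefix_length_le (List.prefix_append v z) h hle)

theorem take_of_prefix_append (u w z : List Char) (h : u <+: w ++ z) : u.take w.length <+: w := by
  have := h.take w.length
  rwa [List.take_left] at this

def Ftbl (tbl : List (List Char × List Char)) (l : List Char) : List Char :=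
  tbl.foldl (fun s pr => PySem.Chars.replace s (' ' :: pr.1) (' ' :: pr.2)) l

theorem Ftbl_chunk (tbl : List (List Char × List Char)) (chunk tail : List Char) (hc : ' ' ∉ chunk) :
    Ftbl tbl (chunk ++ tail) = chunk ++ Ftbl tbl tail := by
  induction tbl generalizing tail with
  | nil => simp [Ftbl]
  | cons pr tl ih =>
    simp only [Ftbl, List.foldl_cons] at *
    rw [rep_chunk _ _ _ _ hc, ih]

theorem Ftbl_space_nomatch (tbl : List (List Char × List Char)) (rest : List Char)
    (hG : ∀ pr ∈ tbl, pr.1 ≠ [] ∧ ' ' ∉ pr.1)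
    (h : ∀ pr ∈ tbl, ¬ pr.1 <+: rest) :
    Ftbl tbl (' ' :: rest) = ' ' :: Ftbl tbl rest := by
  induction tbl generalizing rest with
  | nil => simp [Ftbl]
  | cons pr tl ih =>
    have hpr := hG pr List.mem_cons_self
    have hnm : ¬ (' ' :: pr.1) <+: (' ' :: rest) := by
      intro hcontra
      exact h pr List.mem_cons_self (List.cons_prefix_cons.mp hcontra).2
    simp only [Ftbl, List.foldl_cons]
    rw [replace_cons_nomatch _ _ (by simp) _ _ hnm]
    exact ih (PySem.Chars.replace rest (' ' :: pr.1) (' ' :: pr.2))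
      (fun q hq => hG q (List.mem_cons_of_mem _ hq))
      (fun q hq => nomatch_pres q.1 pr.1 pr.2 (hG q (List.mem_cons_of_mem _ hq)).1
        (hG q (List.mem_cons_of_mem _ hq)).2 rest (h q (List.mem_cons_of_mem _ hq)))

theorem Ftbl_pass_T1 (tbl : List (List Char × List Char)) (full : List Char) (hfsp : ' ' ∉ full)
    (hH : ∀ pr ∈ tbl, ¬ pr.1 <+: full ∧ ¬ full <+: pr.1) :
    ∀ Z, Ftbl tbl (' ' :: (full ++ Z)) = ' ' :: (full ++ Ftbl tbl Z) := by
  induction tbl with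
  | nil => simp [Ftbl]
  | cons pr tl ih =>
    intro Z
    have hpr := hH pr List.mem_cons_self
    have hnm : ¬ (' ' :: pr.1) <+: (' ' :: (full ++ Z)) := by
      intro hcontra
      exact not_prefix_append pr.1 full Z hpr.1 hpr.2 (List.cons_prefix_cons.mp hcontra).2
    simp only [Ftbl, List.foldl_cons]
    rw [replace_cons_nomatch _ _ (by simp) _ _ hnm, rep_chunk _ _ _ _ hfsp]
    exact ih (fun q hq => hH q (List.mem_cons_of_mem _ hq)) _

theorem Ftbl_pass_T2 (tbl : List (List Char × List Char)) (ab : List Char) (hasp : ' ' ∉ ab)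
    (hH : ∀ pr ∈ tbl, ¬ pr.1.take ab.length <+: ab) :
    ∀ Z, Ftbl tbl (' ' :: (ab ++ Z)) = ' ' :: (ab ++ Ftbl tbl Z) := by
  induction tbl with
  | nil => simp [Ftbl]
  | cons pr tl ih =>
    intro Z
    have hpr := hH pr List.mem_cons_self
    have hnm : ¬ (' ' :: pr.1) <+: (' ' :: (ab ++ Z)) := by
      intro hcontra
      exact hpr (take_of_prefix_append _ _ _ (List.cons_prefix_cons.mp hcontra).2)
    simp only [Ftbl, List.foldl_cons]
    rw [replace_cons_nomatch _ _ (by simp) _ _ hnm, rep_chunk _ _ _ _ hasp]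
    exact ih (fun q hq => hH q (List.mem_cons_of_mem _ hq)) _

theorem scan_abbr_eq_some {rest ab r' : List Char} (h : try_match rest = some (ab, r')) :
    scan_abbr (' ' :: rest) = ' ' :: (ab ++ scan_abbr r') := by
  rw [scan_abbr, if_pos rfl]
  split
  · next x y heq =>
    rw [h] at heq
    injection heq with h1
    injection h1 with h2 h3
    rw [h2, h3]
  · next heq => rw [h] at heq; exact absurd heq (by simp)

theorem scan_abbr_eq_none {rest : List Char} (h : try_match rest = none) :
    scan_abbr (' ' :: rest) = ' ' :: scan_abbr rest := by
  rw [scan_abbr, if_pos rfl]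
  split
  · next x y heq => rw [h] at heq; exact absurd heq (by simp)
  · rfl

theorem scan_abbr_cons_ne {c : Char} {rest : List Char} (hc : c ≠ ' ') :
    scan_abbr (c :: rest) = c :: scan_abbr rest := by
  rw [scan_abbr.eq_def]
  simp [hc]

theorem Ftbl_nil (tbl : List (List Char × List Char)) : Ftbl tbl [] = [] := by
  induction tbl with
  | nil => rfl
  | cons pr tl ih => simp only [Ftbl, List.foldl_cons] at *; rw [replace_nil _ _ (by simp), ih]

theorem tbl_G1 : ∀ pr ∈ street_table, pr.1 ≠ [] ∧ (' ' ∉ pr.1) ∧ (' ' ∉ pr.2) := by decide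

theorem tbl_G2 : ∀ p ∈ street_table, ∀ q ∈ street_table, p.1 <+: q.1 → p.1 = q.1 := by decide

theorem tbl_G3 : List.Pairwise (fun p q : List Char × List Char => ¬ (q.1.take p.2.length <+: p.2)) street_table := by decide

theorem F_eq_scan : ∀ (n : Nat) (l : List Char), l.length ≤ n → Ftbl street_table l = scan_abbr l := by
  intro n
  induction n with
  | zero =>
    intro l hl
    have : l = [] := List.eq_nil_of_length_eq_zero (Nat.le_zero.mp hl)
    subst this
    rw [Ftbl_nil, scan_abbr]
  | succ n ih =>
    intro l hl
    cases l with
    | nil => rw [Ftbl_nil, scan_abbr]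
    | cons c rest =>
      by_cases hc : c = ' '
      · subst hc
        rcases hm : try_match rest with _ | ⟨abbr, rest₂⟩
        · -- no match at this space
          have hmk := hm
          unfold try_match at hm
          rcases hf : street_table.find? (fun pr => pr.1.isPrefixOf rest) with _ | ⟨full, ab⟩
          swap
          · rw [hf] at hm; exact absurd hm (by simp)
          have hnone : ∀ pr ∈ street_table, ¬ pr.1 <+: rest := by
            intro pr hpr hcontra
            have := List.find?_eq_none.mp hf pr hpr
            rw [List.isPrefixOf_iff_prefix.mpr hcontra] at this
            simp at this
          rw [Ftbl_space_nomatch _ _ (fun pr h => ⟨(tbl_G1 pr h).1, (tbl_G1 pr h).2.1⟩) hnone]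
          rw [ih rest (Nat.le_of_succ_le_succ hl), scan_abbr_eq_none hmk]
        · -- a street type matches at this space
          have hmk := hm
          unfold try_match at hm
          rcases hf : street_table.find? (fun pr => pr.1.isPrefixOf rest) with _ | ⟨full, ab⟩
          · rw [hf] at hm; exact absurd hm (by simp)
          rw [hf] at hm
          simp only [Option.some.injEq, Prod.mk.injEq] at hm
          have hfind := List.find?_eq_some_iff_append.mp hf
          have hpre : full <+: rest := List.isPrefixOf_iff_prefix.mp hfind.1
          obtain ⟨T1, T2, hsplit, hT1⟩ := hfind.2
          have hmem : (full, ab) ∈ street_table := by rw [hsplit]; simp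
          obtain ⟨rest', hrs⟩ := hpre
          have habbr : abbr = ab := hm.1.symm
          have hr2 : rest₂ = rest' := by
            rw [← hm.2, ← hrs, List.drop_left]
          rw [habbr, hr2] at hmk
          rw [← hrs]
          have hfsp : ' ' ∉ full := (tbl_G1 _ hmem).2.1
          have hasp : ' ' ∉ ab := (tbl_G1 _ hmem).2.2
          have hT1' : ∀ pr ∈ T1, ¬ pr.1 <+: full ∧ ¬ full <+: pr.1 := by
            intro pr hpr
            have hprmem : pr ∈ street_table := by rw [hsplit]; simp [hpr]
            have hnp : ¬ pr.1 <+: (full ++ rest') := by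
              intro hcontra
              have := hT1 pr hpr
              rw [← hrs, List.isPrefixOf_iff_prefix.mpr hcontra] at this
              simp at this
            constructor
            · intro hcontra; exact hnp (hcontra.trans (List.prefix_append _ _))
            · intro hcontra
              have heq := tbl_G2 _ hmem _ hprmem hcontra
              exact hnp (heq ▸ List.prefix_append _ _)
          have hT2' : ∀ pr ∈ T2, ¬ pr.1.take ab.length <+: ab := by
            have hpw := tbl_G3
            rw [hsplit] at hpw
            have := (List.pairwise_append.mp hpw).2.1
            exact fun pr hpr => (List.pairwise_cons.mp this).1 pr hpr
          have hsplitF : ∀ z, Ftbl street_table z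
              = Ftbl T2 (PySem.Chars.replace (Ftbl T1 z) (' ' :: full) (' ' :: ab)) := by
            intro z; rw [hsplit]; simp [Ftbl, List.foldl_append]
          rw [hsplitF]
          rw [Ftbl_pass_T1 T1 full hfsp hT1' rest']
          have hm0 : (' ' :: full) <+: (' ' :: (full ++ Ftbl T1 rest')) :=
            List.cons_prefix_cons.mpr ⟨rfl, List.prefix_append _ _⟩
          rw [replace_match _ _ (by simp) _ hm0]
          have hdrop : (' ' :: (full ++ Ftbl T1 rest')).drop (' ' :: full).length = Ftbl T1 rest' := by
            simp only [List.length_cons, List.drop_succ_cons]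
            exact List.drop_left
          rw [hdrop]
          have hshape : (' ' :: ab) ++ PySem.Chars.replace (Ftbl T1 rest') (' ' :: full) (' ' :: ab)
              = ' ' :: (ab ++ PySem.Chars.replace (Ftbl T1 rest') (' ' :: full) (' ' :: ab)) := by simp
          rw [hshape]
          rw [Ftbl_pass_T2 T2 ab hasp hT2']
          rw [← hsplitF rest']
          have hlen : rest'.length ≤ n := by
            have h2 := hl
            rw [← hrs] at h2
            simp only [List.length_cons, List.length_append] at h2
            omega
          rw [← hrs] at hmk
          rw [ih rest' hlen, scan_abbr_eq_some hmk]
      · -- non-space head: every pass keeps the head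
        have hsingle : c :: rest = [c] ++ rest := rfl
        rw [hsingle, Ftbl_chunk _ _ _ (by simp; exact fun h => hc h.symm)]
        rw [ih rest (Nat.le_of_succ_le_succ hl)]
        simp only [List.singleton_append]
        rw [scan_abbr_cons_ne hc]

theorem replace_single_filter (l : List Char) (d : Char) :
    PySem.Chars.replace l [d] [] = l.filter (fun c => !(c == d)) := by
  induction l with
  | nil => rw [replace_nil _ _ (by simp)]; rfl
  | cons c t ih =>
    by_cases hcd : c = d
    · subst hcd
      rw [replace_match _ _ (by simp) _ (by simp)]
      simp [ih]
    · rw [replace_cons_nomatch _ _ (by simp) _ _ (by simp [List.cons_prefix_cons]; exact fun h => hcd h.symm)]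
      simp [hcd, ih]

theorem ports_agree (a : String) : normalize_addr_py a = normalize_addr_py_alt a := by
  apply String.toList_inj.mp
  have hs2 : ((PySem.Str.strip (PySem.Str.lower a)).toList.filter (fun c => !(c == '.'))).filter
        (fun c => !(c == ','))
      = (PySem.Str.strip (PySem.Str.lower a)).toList.filter (fun c => !(c == '.' || c == ',')) := by
    rw [List.filter_filter]
    apply List.filter_congr
    intro c _
    cases hcd : (c == '.') <;> cases hcc : (c == ',') <;> simp_all
  have hmain := F_eq_scan ((PySem.Str.strip (PySem.Str.lower a)).toList.filter
      (fun c => !(c == '.' || c == ','))).length _ (le_refl _)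
  calc (normalize_addr_py a).toList
      = Ftbl street_table ((PySem.Str.strip (PySem.Str.lower a)).toList.filter
          (fun c => !(c == '.' || c == ','))) := by
        rw [← hs2, ← replace_single_filter, ← replace_single_filter]
        unfold normalize_addr_py repl_table Ftbl street_table
        simp only [List.foldl_cons, List.foldl_nil, PySem.Str.toList_replace]
        rfl
    _ = (normalize_addr_py_alt a).toList := by
        rw [hmain]
        unfold normalize_addr_py_alt
        simp

-- ===== VERDICT (by name: the statement is the Claim_ definition above) =====
theorem normalize_addr_py_spec : Claim_equal_normalize_addr_py := by
  intro a _
  unfold Spec_normalize_addr_py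
  exact ports_agree a
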